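-- pv_equiv track=rewrite | github.com/tomatiks/course_tests | tin_2019/5_message.py | count_msgs
-- ===== SOURCE A (Python) =====
-- def count_msgs(all, corrs):
--     msgs = [(1,all)]
--     msgs2 = []
--     for c in corrs:
--         for msg in msgs:
--             if (c[0]>=msg[0] and c[0]<=msg[1]) or (c[1]>=msg[0] and c[1]<=msg[1]):
--                 pass
--             else:
--                 msgs2.append(msg)
--         msgs = msgs2.copy()
--         msgs2 = []
--         msgs.append(c)
--
--     return len(msgs)
-- ===== SOURCE B (Python) =====
-- def count_msgs(all, corrs):
--     # Scan back-to-front, accumulating endpoints seen so far; an interval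
--     # survives iff no endpoint of a LATER correction lies inside it.
--     count = 0
--     pts = []
--     for c in reversed(corrs):
--         a, b = c[0], c[1]
--         if not any(a <= p <= b for p in pts):
--             count += 1
--         pts.append(a)
--         pts.append(b)
--     if not any(1 <= p <= all for p in pts):
--         count += 1
--     return count
-- ===== Notes on version B (the rewrite author's own statement) =====
-- stated objective: alternative
-- what changed: Instead of repeatedly rebuilding the surviving-interval list after each correction, B scans the corrections back-to-front once, accumulating endpoints and counting each interval that no later endpoint stabs.
-- outside the precondition, e.g. on count_msgs(5, [(3,)]): A returns 1, B raises IndexError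
import Mathlib
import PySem

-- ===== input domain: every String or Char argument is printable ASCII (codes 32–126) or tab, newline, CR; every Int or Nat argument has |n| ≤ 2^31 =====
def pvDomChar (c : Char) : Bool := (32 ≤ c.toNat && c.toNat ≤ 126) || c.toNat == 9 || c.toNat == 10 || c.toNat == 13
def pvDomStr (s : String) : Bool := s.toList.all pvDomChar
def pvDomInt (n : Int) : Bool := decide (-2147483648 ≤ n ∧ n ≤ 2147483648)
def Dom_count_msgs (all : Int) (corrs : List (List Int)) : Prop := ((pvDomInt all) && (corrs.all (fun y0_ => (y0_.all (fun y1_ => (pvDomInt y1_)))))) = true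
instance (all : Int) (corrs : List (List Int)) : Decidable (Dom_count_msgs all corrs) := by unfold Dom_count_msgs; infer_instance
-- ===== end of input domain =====

-- B replaces A's repeated rebuild of the surviving-interval list by one back-to-front
-- scan that accumulates endpoints and counts intervals no later endpoint stabs (alternative).

-- c[0] / c[1]; total stand-ins, exact on rows of length ≥ 2 (Pre_ guarantees that)
def pvFst : List Int → Int
  | [] => 0
  | a :: _ => a

def pvSnd : List Int → Int
  | [] => 0
  | [_] => 0
  | _ :: b :: _ => b

-- ===== PORT A =====
def count_msgs (all : Int) (corrs : List (List Int)) : Int :=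
  let msgs := corrs.foldl (fun msgs c =>
    let msgs2 := msgs.foldl (fun acc msg =>
      if (pvFst c ≥ msg.1 ∧ pvFst c ≤ msg.2) ∨ (pvSnd c ≥ msg.1 ∧ pvSnd c ≤ msg.2) then acc
      else acc ++ [msg]) ([] : List (Int × Int))
    msgs2 ++ [(pvFst c, pvSnd c)]) [(1, all)]
  (msgs.length : Int)

-- ===== PORT B =====
def count_msgs_alt (all : Int) (corrs : List (List Int)) : Int :=
  let r := corrs.reverse.foldl (fun (st : Int × List Int) c =>
    ((if st.2.any (fun p => pvFst c ≤ p && p ≤ pvSnd c) then st.1 else st.1 + 1),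
     st.2 ++ [pvFst c, pvSnd c])) (0, [])
  if r.2.any (fun p => 1 ≤ p && p ≤ all) then r.1 else r.1 + 1

-- ===== PRECONDITION & SPEC =====
-- Pre_ excludes correction rows with fewer than 2 elements: there Python B always raises
-- IndexError, and Python A raises IndexError on most of them too (on some it returns).
def Pre_count_msgs (all : Int) (corrs : List (List Int)) : Prop :=
  ∀ c ∈ corrs, 2 ≤ c.length
instance (all : Int) (corrs : List (List Int)) : Decidable (Pre_count_msgs all corrs) := by
  unfold Pre_count_msgs; infer_instance

def pvWitness_count_msgs : Int × List (List Int) := (10, [[2, 3], [5, 7]])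

def Spec_count_msgs (all : Int) (corrs : List (List Int)) (out : Int) : Prop := out = count_msgs_alt all corrs
instance (all : Int) (corrs : List (List Int)) (out : Int) : Decidable (Spec_count_msgs all corrs out) := by unfold Spec_count_msgs; infer_instance

-- ===== CLAIM (what is proved, stated in full; the proofs are below) =====
def Claim_equal_count_msgs : Prop := ∀ (all : Int) (corrs : List (List Int)), Dom_count_msgs all corrs → Pre_count_msgs all corrs → Spec_count_msgs all corrs (count_msgs all corrs)

-- ===== LEMMAS AND PROOFS =====

-- the two endpoints of a correction
def pvEp (c : List Int) : List Int := [pvFst c, pvSnd c]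

-- some point of pts lies inside [a, b]
def pvStab (a b : Int) (pts : List Int) : Bool := pts.any (fun p => a ≤ p && p ≤ b)

-- B's count: intervals of cs not stabbed by pts nor by endpoints of later corrections
def pvN (pts : List Int) : List (List Int) → Int
  | [] => 0
  | c :: rest =>
      if pvStab (pvFst c) (pvSnd c) (pts ++ rest.flatMap pvEp) then pvN pts rest
      else pvN pts rest + 1

theorem pvStab_append (a b : Int) (x y : List Int) :
    pvStab a b (x ++ y) = (pvStab a b x || pvStab a b y) := by
  simp [pvStab, List.any_append]

theorem pvStab_reverse_flatMap (a b : Int) (l : List (List Int)) :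
    pvStab a b (l.reverse.flatMap pvEp) = pvStab a b (l.flatMap pvEp) := by
  rw [Bool.eq_iff_iff]
  simp [pvStab, List.any_eq_true, List.mem_flatMap]

-- A's inner loop is a filter
theorem pv_foldl_skip {α : Type} (P : α → Prop) [DecidablePred P] (l : List α) (acc : List α) :
    l.foldl (fun acc m => if P m then acc else acc ++ [m]) acc
      = acc ++ l.filter (fun m => !decide (P m)) := by
  induction l generalizing acc with
  | nil => simp
  | cons x xs ih =>
      by_cases h : P x <;> simp [h, ih, List.filter_cons]

-- A's per-correction condition is a stab by c's endpoints
theorem pv_cond_eq (c : List Int) (m : Int × Int) :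
    decide ((pvFst c ≥ m.1 ∧ pvFst c ≤ m.2) ∨ (pvSnd c ≥ m.1 ∧ pvSnd c ≤ m.2))
      = pvStab m.1 m.2 (pvEp c) := by
  rw [Bool.eq_iff_iff]
  simp [pvStab, pvEp]

-- the running list of A splits: old intervals filtered by all future endpoints ++ the fresh run
theorem pvA_split (cs : List (List Int)) : ∀ msgs : List (Int × Int),
    cs.foldl (fun msgs c =>
      let msgs2 := msgs.foldl (fun acc msg =>
        if (pvFst c ≥ msg.1 ∧ pvFst c ≤ msg.2) ∨ (pvSnd c ≥ msg.1 ∧ pvSnd c ≤ msg.2) then acc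
        else acc ++ [msg]) ([] : List (Int × Int))
      msgs2 ++ [(pvFst c, pvSnd c)]) msgs
    = msgs.filter (fun m => !pvStab m.1 m.2 (cs.flatMap pvEp))
      ++ cs.foldl (fun msgs c =>
        let msgs2 := msgs.foldl (fun acc msg =>
          if (pvFst c ≥ msg.1 ∧ pvFst c ≤ msg.2) ∨ (pvSnd c ≥ msg.1 ∧ pvSnd c ≤ msg.2) then acc
          else acc ++ [msg]) ([] : List (Int × Int))
        msgs2 ++ [(pvFst c, pvSnd c)]) [] := by
  induction cs with
  | nil => intro msgs; simp [pvStab]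
  | cons c rest ih =>
      intro msgs
      simp only [List.foldl_cons]
      rw [pv_foldl_skip, pv_foldl_skip]
      simp only [List.nil_append]
      rw [ih (msgs.filter _ ++ [(pvFst c, pvSnd c)]), ih ([].filter _ ++ [(pvFst c, pvSnd c)])]
      rw [List.filter_append, List.filter_append, List.filter_filter]
      simp only [List.filter_nil, List.nil_append, List.append_assoc]
      congr 2
      funext m
      rw [pv_cond_eq]
      simp [pvStab_append, List.flatMap_cons]
      rw [Bool.and_comm]

-- length of A's fresh run = B's count
theorem pvA_len (cs : List (List Int)) :
    (((cs.foldl (fun msgs c =>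
        let msgs2 := msgs.foldl (fun acc msg =>
          if (pvFst c ≥ msg.1 ∧ pvFst c ≤ msg.2) ∨ (pvSnd c ≥ msg.1 ∧ pvSnd c ≤ msg.2) then acc
          else acc ++ [msg]) ([] : List (Int × Int))
        msgs2 ++ [(pvFst c, pvSnd c)]) []).length : Int)) = pvN [] cs := by
  induction cs with
  | nil => simp [pvN]
  | cons c rest ih =>
      simp only [List.foldl_cons, List.foldl_nil, List.nil_append]
      rw [pvA_split rest [(pvFst c, pvSnd c)]]
      simp only [List.length_append]
      rw [List.filter_singleton]
      by_cases h : pvStab (pvFst c) (pvSnd c) (rest.flatMap pvEp) = true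
      · simp [pvN, h, ih]
      · simp only [Bool.not_eq_true] at h
        simp [pvN, h, ih]
        omega

-- B's reversed fold computes (k + pvN pts cs, pts ++ endpoints of cs.reverse)
theorem pvB_run (cs : List (List Int)) : ∀ (k : Int) (pts : List Int),
    cs.reverse.foldl (fun (st : Int × List Int) c =>
      ((if st.2.any (fun p => pvFst c ≤ p && p ≤ pvSnd c) then st.1 else st.1 + 1),
       st.2 ++ [pvFst c, pvSnd c])) (k, pts)
    = (k + pvN pts cs, pts ++ cs.reverse.flatMap pvEp) := by
  induction cs with
  | nil => simp [pvN]
  | cons c rest ih =>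
      intro k pts
      simp only [List.reverse_cons, List.foldl_append, List.foldl_cons, List.foldl_nil]
      rw [ih k pts]
      have hany : ((pts ++ rest.reverse.flatMap pvEp).any (fun p => pvFst c ≤ p && p ≤ pvSnd c))
          = pvStab (pvFst c) (pvSnd c) (pts ++ rest.flatMap pvEp) := by
        rw [show ((pts ++ rest.reverse.flatMap pvEp).any (fun p => pvFst c ≤ p && p ≤ pvSnd c))
              = pvStab (pvFst c) (pvSnd c) (pts ++ rest.reverse.flatMap pvEp) from rfl]
        rw [pvStab_append, pvStab_append, pvStab_reverse_flatMap]
      rw [hany]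
      simp only [pvN]
      by_cases h : pvStab (pvFst c) (pvSnd c) (pts ++ rest.flatMap pvEp) = true
      · simp [h, pvEp, List.append_assoc]
      · simp only [Bool.not_eq_true] at h
        simp [h, pvEp, List.append_assoc]
        omega

-- ===== VERDICT (by name: the statement is the Claim_ definition above) =====
theorem count_msgs_spec : Claim_equal_count_msgs := by
  intro all corrs _ _
  unfold Spec_count_msgs count_msgs count_msgs_alt
  rw [pvA_split corrs [(1, all)]]
  rw [pvB_run corrs 0 []]
  simp only [List.nil_append, Int.zero_add]
  have hb : ∀ l : List Int, (l.any fun p => decide (1 ≤ p) && decide (p ≤ all)) = pvStab 1 all l :=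
    fun _ => rfl
  rw [hb, pvStab_reverse_flatMap, List.filter_singleton]
  by_cases h : pvStab 1 all (corrs.flatMap pvEp) = true
  · simp [h, pvA_len]
  · simp only [Bool.not_eq_true] at h
    simp [h, pvA_len]
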